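-- pv_equiv track=rewrite | github.com/alancast/LeetCodeProblems | python/hard/3347_max_frequency_after_operations_2.py | maxFrequency_sorted
-- ===== SOURCE A (Python) =====
-- from bisect import bisect_left, bisect_right
-- from collections import Counter, defaultdict
-- from typing import List
--
-- def maxFrequency_sorted(nums: List[int], k: int, numOperations: int) -> int:
--     nums.sort()
--
--     answer = 0
--
--     # Keep count of how many times a number is in the array
--     num_count = Counter(nums)
--
--     # Go over all possible nums
--     for num in range(nums[0], nums[-1] + 1):
--         # Find leftmost index that could be num
--         l = bisect_left(nums, num - k)
--         # Find rightmost index that could be num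
--         r = bisect_right(nums, num + k) - 1
--
--         # Find how many nums could be converted to this after operation
--         # If this num is in the array that makes the potential higher
--         # Otherwise it's just the full range of indexes found above
--         if num in num_count:
--             temp_answer = min(r - l + 1, num_count[num] + numOperations)
--         else:
--             temp_answer = min(r - l + 1, numOperations)
--
--         answer = max(answer, temp_answer)
--
--     return answer
-- ===== SOURCE B (Python) =====
-- from bisect import bisect_left, bisect_right
-- from typing import List
--
--
-- def maxFrequency_sorted(nums: List[int], k: int, numOperations: int) -> int:
--     # Same observable side effect as the original: sorts nums in place.
--     nums.sort()
--     if k < 0: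
--         return 0
--     best = 0
--     for i, v in enumerate(nums):
--         # candidate target = an existing value v
--         w = bisect_right(nums, v + k) - bisect_left(nums, v - k)
--         c = bisect_right(nums, v) - bisect_left(nums, v)
--         best = max(best, min(w, c + numOperations))
--         # best window ending at i coverable by a single target (span <= 2k),
--         # capped by numOperations (covers all non-present targets)
--         best = max(best, min(i + 1 - bisect_left(nums, v - 2 * k), numOperations))
--     return best
-- ===== Notes on version B (the rewrite author's own statement) =====
-- stated objective: faster
-- what changed: B evaluates only O(n) candidate targets (each array value, plus the largest span-<=2k window ending at each index capped by numOperations) with bisect, instead of scanning every integer between min(nums) and max(nums).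
import Mathlib
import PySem

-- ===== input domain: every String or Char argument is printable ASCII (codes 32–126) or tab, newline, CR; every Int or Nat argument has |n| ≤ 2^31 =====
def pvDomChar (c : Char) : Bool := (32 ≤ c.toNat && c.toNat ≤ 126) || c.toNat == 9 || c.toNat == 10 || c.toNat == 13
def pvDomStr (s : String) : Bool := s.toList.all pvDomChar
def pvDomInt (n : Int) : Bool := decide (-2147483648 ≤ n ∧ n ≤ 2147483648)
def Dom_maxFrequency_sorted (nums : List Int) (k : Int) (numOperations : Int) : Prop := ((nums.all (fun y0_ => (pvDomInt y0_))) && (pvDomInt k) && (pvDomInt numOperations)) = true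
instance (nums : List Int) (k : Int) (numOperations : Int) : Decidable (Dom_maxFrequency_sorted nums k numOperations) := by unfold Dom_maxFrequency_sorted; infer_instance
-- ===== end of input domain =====

-- B scans only O(n) candidate targets (array values + best span-≤2k window per index) with bisect
-- instead of every integer between min and max; both sort nums in place, equivalence is about the return value.

-- ===== PORT A =====
def maxFrequency_sorted (nums : List Int) (k : Int) (numOperations : Int) : Int :=
  let s := PySem.List.sorted nums (fun x => x)   -- nums.sort()
  match s with
  | [] => 0        -- Python raises IndexError on nums[0]; excluded by Pre_
  | a :: t =>
    let numCount := PySem.Dict.counter (a :: t)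
    (PySem.List.pyRange a ((a :: t).getLast (List.cons_ne_nil a t) + 1)).foldl
      (fun answer num =>
        let l : Int := PySem.List.bisectLeft (a :: t) (num - k)
        let r : Int := (PySem.List.bisectRight (a :: t) (num + k) : Int) - 1
        let temp :=
          if numCount.contains num then
            min (r - l + 1) (numCount.getD num 0 + numOperations)
          else
            min (r - l + 1) numOperations
        max answer temp) 0

-- ===== PORT B =====
def maxFrequency_sorted_alt (nums : List Int) (k : Int) (numOperations : Int) : Int :=
  let s := PySem.List.sorted nums (fun x => x)   -- nums.sort()
  if k < 0 then 0
  else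
    (PySem.List.enumerate s).foldl
      (fun best p =>
        let i := p.1
        let v := p.2
        let w : Int := (PySem.List.bisectRight s (v + k) : Int) - (PySem.List.bisectLeft s (v - k) : Int)
        let c : Int := (PySem.List.bisectRight s v : Int) - (PySem.List.bisectLeft s v : Int)
        let best1 := max best (min w (c + numOperations))
        max best1 (min (i + 1 - (PySem.List.bisectLeft s (v - 2 * k) : Int)) numOperations)) 0

-- ===== PRECONDITION & SPEC =====
-- Pre_ excludes only the empty list, on which Python A raises IndexError (nums[0]).
def Pre_maxFrequency_sorted (nums : List Int) (k : Int) (numOperations : Int) : Prop := nums ≠ []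
instance (nums : List Int) (k : Int) (numOperations : Int) : Decidable (Pre_maxFrequency_sorted nums k numOperations) := by unfold Pre_maxFrequency_sorted; infer_instance
def pvWitness_maxFrequency_sorted : List Int × Int × Int := ([5, 11, 20, 20], 5, 1)

def Spec_maxFrequency_sorted (nums : List Int) (k : Int) (numOperations : Int) (out : Int) : Prop := out = maxFrequency_sorted_alt nums k numOperations
instance (nums : List Int) (k : Int) (numOperations : Int) (out : Int) : Decidable (Spec_maxFrequency_sorted nums k numOperations out) := by unfold Spec_maxFrequency_sorted; infer_instance

-- ===== CLAIM (what is proved, stated in full; the proofs are below) =====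
def Claim_equal_maxFrequency_sorted : Prop := ∀ (nums : List Int) (k : Int) (numOperations : Int), Dom_maxFrequency_sorted nums k numOperations → Pre_maxFrequency_sorted nums k numOperations → Spec_maxFrequency_sorted nums k numOperations (maxFrequency_sorted nums k numOperations)

-- ===== LEMMAS AND PROOFS =====

-- Int versions of the bisection points
def pvBl (s : List Int) (x : Int) : Int := (PySem.List.bisectLeft s x : Int)
def pvBr (s : List Int) (x : Int) : Int := (PySem.List.bisectRight s x : Int)

-- A's per-candidate value
def pvTA (s : List Int) (k nOps num : Int) : Int :=
  if (PySem.Dict.counter s).contains num then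
    min ((pvBr s (num + k) - 1) - pvBl s (num - k) + 1) ((PySem.Dict.counter s).getD num 0 + nOps)
  else
    min ((pvBr s (num + k) - 1) - pvBl s (num - k) + 1) nOps

-- B's two per-index values
def pvTW (s : List Int) (k nOps : Int) (p : Int × Int) : Int :=
  min (pvBr s (p.2 + k) - pvBl s (p.2 - k)) ((pvBr s p.2 - pvBl s p.2) + nOps)
def pvTU (s : List Int) (k nOps : Int) (p : Int × Int) : Int :=
  min (p.1 + 1 - pvBl s (p.2 - 2 * k)) nOps

theorem pvBr_le_len (s : List Int) (x : Int) (hs : s.Pairwise (· ≤ ·)) :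
    pvBr s x ≤ (s.length : Int) := by
  have h := (PySem.List.bisectRight_spec s x hs).1
  unfold pvBr; exact_mod_cast h

theorem pvBl_nonneg (s : List Int) (x : Int) : 0 ≤ pvBl s x := by
  unfold pvBl; positivity

theorem pvBr_gt_of_getElem (s : List Int) (hs : s.Pairwise (· ≤ ·)) (j : Nat) (hj : j < s.length) :
    (j : Int) < pvBr s (s[j]) := by
  obtain ⟨h1, h2, h3⟩ := PySem.List.bisectRight_spec s (s[j]) hs
  by_contra h
  have hle : PySem.List.bisectRight s s[j] ≤ j := by unfold pvBr at h; omega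
  exact absurd (h3 j hj hle) (lt_irrefl _)

theorem pvBl_mono (s : List Int) (hs : s.Pairwise (· ≤ ·)) {x y : Int} (h : x ≤ y) :
    pvBl s x ≤ pvBl s y := by
  obtain ⟨hx1, hx2, hx3⟩ := PySem.List.bisectLeft_spec s x hs
  obtain ⟨hy1, hy2, hy3⟩ := PySem.List.bisectLeft_spec s y hs
  by_contra hc
  have hlt : PySem.List.bisectLeft s y < PySem.List.bisectLeft s x := by unfold pvBl at hc; omega
  have hj : PySem.List.bisectLeft s y < s.length := lt_of_lt_of_le hlt hx1
  have := hx2 _ hj hlt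
  have := hy3 _ hj le_rfl
  omega

theorem pvBr_mono (s : List Int) (hs : s.Pairwise (· ≤ ·)) {x y : Int} (h : x ≤ y) :
    pvBr s x ≤ pvBr s y := by
  obtain ⟨hx1, hx2, hx3⟩ := PySem.List.bisectRight_spec s x hs
  obtain ⟨hy1, hy2, hy3⟩ := PySem.List.bisectRight_spec s y hs
  by_contra hc
  have hlt : PySem.List.bisectRight s y < PySem.List.bisectRight s x := by unfold pvBr at hc; omega
  have hj : PySem.List.bisectRight s y < s.length := lt_of_lt_of_le hlt hx1
  have := hx2 _ hj hlt
  have := hy3 _ hj le_rfl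
  omega

theorem pvBr_le_pvBl_of_lt (s : List Int) (hs : s.Pairwise (· ≤ ·)) {x y : Int} (h : x < y) :
    pvBr s x ≤ pvBl s y := by
  obtain ⟨hx1, hx2, hx3⟩ := PySem.List.bisectRight_spec s x hs
  obtain ⟨hy1, hy2, hy3⟩ := PySem.List.bisectLeft_spec s y hs
  by_contra hc
  have hlt : PySem.List.bisectLeft s y < PySem.List.bisectRight s x := by unfold pvBr pvBl at hc; omega
  have hj : PySem.List.bisectLeft s y < s.length := lt_of_lt_of_le hlt hx1
  have := hx2 _ hj hlt
  have := hy3 _ hj le_rfl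
  omega

theorem pvCount_eq (s : List Int) (hs : s.Pairwise (· ≤ ·)) (v : Int) :
    (s.count v : Int) = pvBr s v - pvBl s v := by
  obtain ⟨hl1, hl2, hl3⟩ := PySem.List.bisectLeft_spec s v hs
  obtain ⟨hr1, hr2, hr3⟩ := PySem.List.bisectRight_spec s v hs
  set bl := PySem.List.bisectLeft s v with hbl
  set br := PySem.List.bisectRight s v with hbr
  have hblbr : bl ≤ br := by
    by_contra hc
    have hlt : br < bl := by omega
    have hj : br < s.length := lt_of_lt_of_le hlt hl1
    have := hl2 _ hj hlt
    have := hr3 _ hj le_rfl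
    omega
  have hdrop0 : s.count v = (s.take br).count v := by
    have h0 : (s.drop br).count v = 0 := by
      rw [List.count_eq_zero]
      intro hmem
      obtain ⟨j, hj, hjv⟩ := List.mem_iff_getElem.1 hmem
      rw [List.getElem_drop] at hjv
      have hjlen : br + j < s.length := by
        rw [List.length_drop] at hj; omega
      have := hr3 (br + j) hjlen (by omega)
      omega
    conv_lhs => rw [← List.take_append_drop br s]
    rw [List.count_append, h0]
    omega
  have htake0 : (s.take br).count v = ((s.take br).drop bl).count v := by
    have h0 : ((s.take br).take bl).count v = 0 := by
      rw [List.take_take, min_eq_left hblbr, List.count_eq_zero]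
      intro hmem
      obtain ⟨j, hj, hjv⟩ := List.mem_iff_getElem.1 hmem
      rw [List.getElem_take] at hjv
      have hjbl : j < bl := by rw [List.length_take] at hj; omega
      have hjlen : j < s.length := by rw [List.length_take] at hj; omega
      have := hl2 j hjlen hjbl
      omega
    conv_lhs => rw [← List.take_append_drop bl (s.take br)]
    rw [List.count_append, h0]
    omega
  have hmid : ((s.take br).drop bl).count v = ((s.take br).drop bl).length := by
    rw [List.count_eq_length]
    intro b hb
    obtain ⟨j, hj, hjv⟩ := List.mem_iff_getElem.1 hb
    rw [List.getElem_drop, List.getElem_take] at hjv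
    have hlen' : bl + j < br ∧ bl + j < s.length := by
      rw [List.length_drop, List.length_take] at hj
      omega
    have h1 := hl3 (bl + j) hlen'.2 (by omega)
    have h2 := hr2 (bl + j) hlen'.2 (by omega)
    omega
  have hlenmid : ((s.take br).drop bl).length = br - bl := by
    rw [List.length_drop, List.length_take]; omega
  have hfin : s.count v = br - bl := by rw [hdrop0, htake0, hmid, hlenmid]
  unfold pvBr pvBl
  rw [← hbl, ← hbr]
  omega

-- on a sorted nonempty list the head is minimal
theorem pvHead_le (a : Int) (t : List Int) (hs : (a :: t).Pairwise (· ≤ ·)) :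
    ∀ y ∈ a :: t, a ≤ y := by
  intro y hy
  rcases List.mem_cons.1 hy with h | h
  · omega
  · exact (List.pairwise_cons.1 hs).1 y h

theorem pvLe_getLast (s : List Int) (hs : s.Pairwise (· ≤ ·)) (hne : s ≠ []) :
    ∀ y ∈ s, y ≤ s.getLast hne := by
  intro y hy
  obtain ⟨j, hj, hjy⟩ := List.mem_iff_getElem.1 hy
  have hlen : 0 < s.length := List.length_pos_iff.2 hne
  rw [List.getLast_eq_getElem]
  rcases Nat.lt_or_ge j (s.length - 1) with hlt | hge
  · have := (List.pairwise_iff_getElem.1 hs) j (s.length - 1) hj (by omega) hlt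
    omega
  · have : j = s.length - 1 := by omega
    subst this
    omega

theorem pvFoldl_max_le (L : List Int) (a c : Int) (h0 : a ≤ c) (h : ∀ y ∈ L, y ≤ c) :
    L.foldl max a ≤ c := by
  induction L generalizing a with
  | nil => exact h0
  | cons x xs ih =>
    exact ih (max a x) (by have := h x (by simp); omega) (fun y hy => h y (by simp [hy]))

theorem pvFoldl_two_max (L : List (Int × Int)) (g1 g2 : Int × Int → Int) (a : Int) :
    L.foldl (fun b p => max (max b (g1 p)) (g2 p)) a
      = (L.flatMap (fun p => [g1 p, g2 p])).foldl max a := by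
  induction L generalizing a with
  | nil => rfl
  | cons p ps ih =>
    simp only [List.flatMap_cons, List.cons_append, List.nil_append, List.foldl_cons]
    exact ih _

-- the core equivalence on an already-sorted nonempty list
theorem pvCore (a : Int) (t : List Int) (k nOps : Int) (hs : (a :: t).Pairwise (· ≤ ·)) :
    (PySem.List.pyRange a ((a :: t).getLast (List.cons_ne_nil a t) + 1)).foldl
      (fun answer num => max answer (pvTA (a :: t) k nOps num)) 0
    = if k < 0 then 0
      else (PySem.List.enumerate (a :: t)).foldl
        (fun best p => max (max best (pvTW (a :: t) k nOps p)) (pvTU (a :: t) k nOps p)) 0 := by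
  have hne : (a :: t) ≠ [] := List.cons_ne_nil a t
  have hlen : 0 < (a :: t).length := by simp
  have hlast := pvLe_getLast (a :: t) hs hne
  have hhead := pvHead_le a t hs
  have halast : a ≤ (a :: t).getLast hne := hlast a (by simp)
  -- both folds as foldl max 0 over explicit candidate lists
  rw [show (fun (answer num : Int) => max answer (pvTA (a :: t) k nOps num))
        = (fun (x : Int) (y : Int) => max x (pvTA (a :: t) k nOps y)) from rfl,
      ← List.foldl_map (f := pvTA (a :: t) k nOps) (g := max),
      pvFoldl_two_max]
  set LA := (List.map (pvTA (a :: t) k nOps)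
      (PySem.List.pyRange a ((a :: t).getLast hne + 1))) with hLA
  set LB := ((PySem.List.enumerate (a :: t)).flatMap
      (fun p => [pvTW (a :: t) k nOps p, pvTU (a :: t) k nOps p])) with hLB
  by_cases hk : k < 0
  · rw [if_pos hk]
    refine le_antisymm (pvFoldl_max_le _ _ _ le_rfl ?_) (PySem.List.le_foldl_max LA 0).1
    intro y hy
    obtain ⟨num, hnum, rfl⟩ := List.mem_map.1 hy
    have h1 : pvBr (a :: t) (num + k) ≤ pvBl (a :: t) (num - k) :=
      pvBr_le_pvBl_of_lt (a :: t) hs (by omega)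
    unfold pvTA
    split_ifs <;> omega
  · rw [if_neg hk]
    have hk0 : (0 : Int) ≤ k := by omega
    -- membership helpers
    have hmemB : ∀ (i : Nat), ∀ hi : i < (a :: t).length,
        pvTW (a :: t) k nOps ((i : Int), (a :: t)[i]) ∈ LB ∧
        pvTU (a :: t) k nOps ((i : Int), (a :: t)[i]) ∈ LB := by
      intro i hi
      have hp : ((i : Int), (a :: t)[i]) ∈ PySem.List.enumerate (a :: t) := by
        rw [PySem.List.mem_enumerate_iff]
        exact ⟨i, hi, by simp⟩
      constructor <;> exact List.mem_flatMap.2 ⟨_, hp, by simp⟩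
    have hmemA : ∀ num : Int, a ≤ num → num ≤ (a :: t).getLast hne →
        pvTA (a :: t) k nOps num ∈ LA := by
      intro num h1 h2
      exact List.mem_map.2 ⟨num, PySem.List.mem_pyRange_one.2 ⟨h1, by omega⟩, rfl⟩
    -- A's value at a present number equals B's first candidate value
    have hTAW : ∀ (i : Nat), ∀ hi : i < (a :: t).length,
        pvTA (a :: t) k nOps ((a :: t)[i])
          = pvTW (a :: t) k nOps ((i : Int), (a :: t)[i]) := by
      intro i hi
      have hmem : (a :: t)[i] ∈ (a :: t) := List.getElem_mem hi
      have hcont : (PySem.Dict.counter (a :: t)).contains ((a :: t)[i]) = true := by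
        rw [PySem.Dict.contains_counter]; exact List.contains_iff_mem.2 hmem
      have hcnt : (PySem.Dict.counter (a :: t)).getD ((a :: t)[i]) 0
          = pvBr (a :: t) ((a :: t)[i]) - pvBl (a :: t) ((a :: t)[i]) := by
        rw [PySem.Dict.getD_counter]
        exact pvCount_eq (a :: t) hs _
      unfold pvTA pvTW
      dsimp only
      rw [if_pos hcont, hcnt]
      omega
    refine le_antisymm (pvFoldl_max_le _ _ _ (PySem.List.le_foldl_max LB 0).1 ?_)
      (pvFoldl_max_le _ _ _ (PySem.List.le_foldl_max LA 0).1 ?_)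
    · -- every A-candidate is bounded by B's fold
      intro y hy
      obtain ⟨num, hnum, rfl⟩ := List.mem_map.1 hy
      obtain ⟨hge, hlt⟩ := PySem.List.mem_pyRange_one.1 hnum
      by_cases hcont : (PySem.Dict.counter (a :: t)).contains num = true
      · have hmem : num ∈ (a :: t) := by
          rw [PySem.Dict.contains_counter] at hcont
          exact List.contains_iff_mem.1 hcont
        obtain ⟨i, hi, hiv⟩ := List.mem_iff_getElem.1 hmem
        have heq := hTAW i hi
        have hmm := (hmemB i hi).1
        rw [hiv] at heq hmm
        rw [heq]
        exact (PySem.List.le_foldl_max LB 0).2 _ hmm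
      · by_cases hW : pvBr (a :: t) (num + k) - pvBl (a :: t) (num - k) ≤ 0
        · have h0 : pvTA (a :: t) k nOps num ≤ 0 := by
            unfold pvTA; split_ifs <;> omega
          have := (PySem.List.le_foldl_max LB 0).1
          omega
        · have hbrpos : 1 ≤ PySem.List.bisectRight (a :: t) (num + k) := by
            have := pvBl_nonneg (a :: t) (num - k)
            unfold pvBr pvBl at hW this
            omega
          set i : Nat := PySem.List.bisectRight (a :: t) (num + k) - 1 with hidef
          have hilt : i < (a :: t).length := by
            have := pvBr_le_len (a :: t) (num + k) hs
            unfold pvBr at this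
            omega
          have hsi_le : (a :: t)[i] ≤ num + k :=
            (PySem.List.bisectRight_spec (a :: t) (num + k) hs).2.1 i hilt (by omega)
          have hble : pvBl (a :: t) ((a :: t)[i] - 2 * k) ≤ pvBl (a :: t) (num - k) :=
            pvBl_mono (a :: t) hs (by omega)
          have hi1 : (i : Int) + 1 = pvBr (a :: t) (num + k) := by
            unfold pvBr; push_cast [hidef]; omega
          have hfin : pvTA (a :: t) k nOps num
              ≤ pvTU (a :: t) k nOps ((i : Int), (a :: t)[i]) := by
            unfold pvTA pvTU
            dsimp only
            rw [if_neg hcont]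
            omega
          exact le_trans hfin ((PySem.List.le_foldl_max LB 0).2 _ (hmemB i hilt).2)
    · -- every B-candidate is bounded by A's fold
      intro z hz
      obtain ⟨p, hp, hzin⟩ := List.mem_flatMap.1 hz
      obtain ⟨i, hi, rfl⟩ := (PySem.List.mem_enumerate_iff _ _ _).1 hp
      have hvmem : (a :: t)[i] ∈ (a :: t) := List.getElem_mem hi
      have hv_le : (a :: t)[i] ≤ (a :: t).getLast hne := hlast _ hvmem
      have hv_ge : a ≤ (a :: t)[i] := hhead _ hvmem
      simp only [List.mem_cons, List.not_mem_nil, or_false] at hzin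
      have hz0 : ((0 : Int) + (i : Int), (a :: t)[i]) = ((i : Int), (a :: t)[i]) := by
        simp
      rcases hzin with rfl | rfl
      · -- the per-value candidate
        rw [hz0, ← hTAW i hi]
        exact (PySem.List.le_foldl_max LA 0).2 _ (hmemA _ hv_ge hv_le)
      · -- the window candidate: compare with A at target max (v - k) a
        rw [hz0]
        set v := (a :: t)[i] with hvdef
        have hbrv : (i : Int) < pvBr (a :: t) v := pvBr_gt_of_getElem (a :: t) hs i hi
        by_cases hvk : a ≤ v - k
        · have htle : v - k ≤ (a :: t).getLast hne := by omega
          have hbr1 : (i : Int) + 1 ≤ pvBr (a :: t) ((v - k) + k) := by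
            have : pvBr (a :: t) v ≤ pvBr (a :: t) ((v - k) + k) :=
              pvBr_mono (a :: t) hs (by omega)
            omega
          have hbl1 : pvBl (a :: t) ((v - k) - k) ≤ pvBl (a :: t) (v - 2 * k) :=
            pvBl_mono (a :: t) hs (by omega)
          have hfin : pvTU (a :: t) k nOps ((i : Int), v)
              ≤ pvTA (a :: t) k nOps (v - k) := by
            unfold pvTA pvTU
            dsimp only
            split_ifs with hc
            · have hcnt0 : (0 : Int) ≤ (PySem.Dict.counter (a :: t)).getD (v - k) 0 := by
                rw [PySem.Dict.getD_counter]; positivity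
              omega
            · omega
          exact le_trans hfin ((PySem.List.le_foldl_max LA 0).2 _ (hmemA _ hvk htle))
        · have hbr1 : (i : Int) + 1 ≤ pvBr (a :: t) (a + k) := by
            have : pvBr (a :: t) v ≤ pvBr (a :: t) (a + k) :=
              pvBr_mono (a :: t) hs (by omega)
            omega
          have hbl0 : pvBl (a :: t) (a - k) = 0 := by
            by_contra hc
            have hpos : 0 < PySem.List.bisectLeft (a :: t) (a - k) := by
              have := pvBl_nonneg (a :: t) (a - k)
              unfold pvBl at this hc
              omega
            have := (PySem.List.bisectLeft_spec (a :: t) (a - k) hs).2.1 0 hlen hpos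
            simp at this
            omega
          have hbl1 : pvBl (a :: t) (a - k) ≤ pvBl (a :: t) (v - 2 * k) := by
            rw [hbl0]; exact pvBl_nonneg _ _
          have hfin : pvTU (a :: t) k nOps ((i : Int), v)
              ≤ pvTA (a :: t) k nOps a := by
            unfold pvTA pvTU
            dsimp only
            split_ifs with hc
            · have hcnt0 : (0 : Int) ≤ (PySem.Dict.counter (a :: t)).getD a 0 := by
                rw [PySem.Dict.getD_counter]; positivity
              omega
            · omega
          exact le_trans hfin ((PySem.List.le_foldl_max LA 0).2 _ (hmemA _ le_rfl halast))

-- ===== VERDICT (by name: the statement is the Claim_ definition above) =====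
theorem maxFrequency_sorted_spec : Claim_equal_maxFrequency_sorted := by
  intro nums k nOps hD hP
  unfold Spec_maxFrequency_sorted
  obtain ⟨a, t, hst⟩ : ∃ a t, PySem.List.sorted nums (fun x => x) = a :: t := by
    have : PySem.List.sorted nums (fun x => x) ≠ [] := by
      simpa [PySem.List.sorted_eq_nil_iff] using hP
    exact List.exists_cons_of_ne_nil this
  have hs : (a :: t).Pairwise (· ≤ ·) := by
    have := PySem.List.sorted_pairwise nums (fun x => x)
    rwa [hst] at this
  have hA : maxFrequency_sorted nums k nOps
      = (PySem.List.pyRange a ((a :: t).getLast (List.cons_ne_nil a t) + 1)).foldl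
          (fun answer num => max answer (pvTA (a :: t) k nOps num)) 0 := by
    simp only [maxFrequency_sorted, hst]
    rfl
  have hB : maxFrequency_sorted_alt nums k nOps
      = if k < 0 then 0
        else (PySem.List.enumerate (a :: t)).foldl
          (fun best p => max (max best (pvTW (a :: t) k nOps p)) (pvTU (a :: t) k nOps p)) 0 := by
    simp only [maxFrequency_sorted_alt, hst]
    rfl
  rw [hA, hB, pvCore a t k nOps hs]
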